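-- pv_equiv track=rewrite | github.com/FlopperTheDolphin/liBERTy | fun/comp_att.py | sm
-- ===== SOURCE A (Python) =====
-- def sm(next,most_important,direction,smear=None):
--
--  if smear == None:
--   smear = list()
--
--  if next < 0:
--   return smear
--
--  if next in most_important:
--   smear.append(next)
--   if direction == 'r':
--    next=next+1
--    smear = sm(next,most_important,direction,smear)
--    return smear
--   elif direction == 'l':
--    next=next-1
--    smear = sm(next,most_important,direction,smear)
--    return smear
--
--  else:
--   return smear
-- ===== SOURCE B (Python) =====
-- def sm(next, most_important, direction, smear=None):
--     # Return-value equivalence; like A, mutates and returns the caller's smear list.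
--     if smear is None:
--         smear = []
--     step = 1 if direction == 'r' else -1 if direction == 'l' else 0
--     s = set(most_important)
--     if step == 0:
--         if next >= 0 and next in s:
--             smear.append(next)
--         return smear
--     k = 0
--     while next + k * step >= 0 and next + k * step in s:
--         k += 1
--     smear.extend(range(next, next + k * step, step))
--     return smear
-- ===== Notes on version B (the rewrite author's own statement) =====
-- stated objective: alternative
-- what changed: Replaces A's non-tail recursion (rebuilding the list through recursive returns, with an O(n) list membership test per step) with a run-length computation over a prebuilt set followed by a single extend of a range; Pre_ excludes the inputs where A falls off the end and returns None (non-negative next in the list with a direction other than 'r'/'l').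
-- outside the precondition, e.g. on sm(2, [2, 3], 'x', None): A returns None, B returns [2]
import Mathlib
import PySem

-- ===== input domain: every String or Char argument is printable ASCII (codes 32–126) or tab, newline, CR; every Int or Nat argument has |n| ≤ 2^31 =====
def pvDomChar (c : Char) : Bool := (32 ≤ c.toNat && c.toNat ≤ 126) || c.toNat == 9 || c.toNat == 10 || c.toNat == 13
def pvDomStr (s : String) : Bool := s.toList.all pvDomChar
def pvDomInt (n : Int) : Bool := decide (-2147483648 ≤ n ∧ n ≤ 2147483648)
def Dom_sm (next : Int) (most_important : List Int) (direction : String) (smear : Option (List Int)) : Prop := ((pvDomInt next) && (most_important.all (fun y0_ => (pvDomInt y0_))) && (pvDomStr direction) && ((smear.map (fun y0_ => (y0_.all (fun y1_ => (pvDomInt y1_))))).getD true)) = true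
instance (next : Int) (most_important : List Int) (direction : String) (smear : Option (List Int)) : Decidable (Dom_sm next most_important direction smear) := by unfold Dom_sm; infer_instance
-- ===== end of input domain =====

-- B replaces A's non-tail recursion (O(n) list membership per step) by computing the run
-- length over a prebuilt set and appending one range; return-value equivalence only
-- (both Pythons mutate/return the caller's smear list).

-- Termination helpers (cited by the ports' decreasing_by):
theorem pv_init_le_foldl_max (l : List Int) (b : Int) : b ≤ l.foldl max b := by
  induction l generalizing b with
  | nil => exact le_refl b
  | cons x xs ih => exact le_trans (le_max_left b x) (ih (max b x))

theorem pv_mem_le_foldl_max {a : Int} {l : List Int} (b : Int) (h : a ∈ l) :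
    a ≤ l.foldl max b := by
  induction l generalizing b with
  | nil => cases h
  | cons x xs ih =>
    rcases List.mem_cons.mp h with h | h
    · subst h; exact le_trans (le_max_right b a) (pv_init_le_foldl_max xs (max b a))
    · exact ih (max b x) h

-- ===== PORT A =====
-- A's recursion; in the branch next ∈ most_important with direction neither "r" nor "l",
-- Python A falls off the end and returns None — excluded by Pre_sm (port returns smear there).
def smA (next : Int) (most_important : List Int) (direction : String) (smear : List Int) : List Int :=
  if next < 0 then smear
  else if hmem : next ∈ most_important then
    let smear2 := smear ++ [next]
    if direction = "r" then smA (next + 1) most_important direction smear2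
    else if direction = "l" then smA (next - 1) most_important direction smear2
    else smear2
  else smear
termination_by (if direction = "r" then (most_important.foldl max 0 + 1 - next).toNat
                else (next + 1).toNat)
decreasing_by
  · have hM := pv_mem_le_foldl_max (a := next) (l := most_important) 0 hmem
    simp only [if_pos ‹direction = "r"›]
    omega
  · rename_i hl
    subst hl
    simp only [if_neg (by decide : ¬ ("l" : String) = "r")]
    omega

def sm (next : Int) (most_important : List Int) (direction : String) (smear : Option (List Int)) : List Int :=
  smA next most_important direction (smear.getD [])

-- ===== PORT B =====
-- k = length of the while-loop run; the 'step ≠ 0' conjunct only makes the loop total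
-- (Python B reaches it only with step = ±1).
def sm_run (next : Int) (s : List Int) (step : Int) : Nat :=
  if h : 0 ≤ next ∧ next ∈ s ∧ step ≠ 0 then sm_run (next + step) s step + 1 else 0
termination_by (if 0 < step then (s.foldl max 0 + 1 - next).toNat else (next + 1).toNat)
decreasing_by
  have hM := pv_mem_le_foldl_max (a := next) (l := s) 0 h.2.1
  have hs := h.2.2
  split_ifs <;> omega

def sm_alt (next : Int) (most_important : List Int) (direction : String) (smear : Option (List Int)) : List Int :=
  let smear := smear.getD []
  let step : Int := if direction = "r" then 1 else if direction = "l" then -1 else 0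
  let s : PySem.Set Int := PySem.Set.ofList most_important
  if step = 0 then
    if 0 ≤ next ∧ next ∈ s then smear ++ [next] else smear
  else
    smear ++ PySem.List.pyRange next (next + (sm_run next s step) * step) step

-- ===== PRECONDITION & SPEC =====
-- Pre_ excludes exactly the inputs where Python A falls off the end and returns None
-- (a non-list): next ≥ 0, next in the list, and direction neither 'r' nor 'l'.
def Pre_sm (next : Int) (most_important : List Int) (direction : String) (smear : Option (List Int)) : Prop :=
  ¬ (0 ≤ next ∧ next ∈ most_important ∧ direction ≠ "r" ∧ direction ≠ "l")
instance (next : Int) (most_important : List Int) (direction : String) (smear : Option (List Int)) : Decidable (Pre_sm next most_important direction smear) := by unfold Pre_sm; infer_instance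

def pvWitness_sm : Int × List Int × String × Option (List Int) := (0, [0, 1, 2], "r", none)

def Spec_sm (next : Int) (most_important : List Int) (direction : String) (smear : Option (List Int)) (out : List Int) : Prop := out = sm_alt next most_important direction smear
instance (next : Int) (most_important : List Int) (direction : String) (smear : Option (List Int)) (out : List Int) : Decidable (Spec_sm next most_important direction smear out) := by unfold Spec_sm; infer_instance

-- ===== CLAIM (what is proved, stated in full; the proofs are below) =====
def Claim_equal_sm : Prop := ∀ (next : Int) (most_important : List Int) (direction : String) (smear : Option (List Int)), Dom_sm next most_important direction smear → Pre_sm next most_important direction smear → Spec_sm next most_important direction smear (sm next most_important direction smear)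

-- ===== LEMMAS AND PROOFS =====

theorem sm_run_zero {next : Int} {s : List Int} {step : Int}
    (h : ¬ (0 ≤ next ∧ next ∈ s ∧ step ≠ 0)) : sm_run next s step = 0 := by
  rw [sm_run]; simp [h]

theorem sm_run_succ {next : Int} {s : List Int} {step : Int}
    (h : 0 ≤ next ∧ next ∈ s ∧ step ≠ 0) :
    sm_run next s step = sm_run (next + step) s step + 1 := by
  rw [sm_run]; simp [h]

theorem smA_r (most_important : List Int) :
    ∀ (n : Nat) (next : Int) (smear : List Int),
      sm_run next (PySem.Set.ofList most_important) 1 = n →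
      smA next most_important "r" smear =
        smear ++ PySem.List.pyRange next (next + (n : Int) * 1) 1 := by
  intro n
  induction n with
  | zero =>
    intro next smear h
    have hc : ¬ (0 ≤ next ∧ next ∈ PySem.Set.ofList most_important ∧ (1 : Int) ≠ 0) := by
      intro hc
      rw [sm_run_succ hc] at h
      omega
    rw [smA]
    have hrange : PySem.List.pyRange next (next + (0 : Int) * 1) 1 = [] :=
      PySem.List.pyRange_one_eq_nil (by omega)
    by_cases hneg : next < 0
    · simp [hneg]
    · have hnm : ¬ next ∈ most_important := by
        intro hm
        exact hc ⟨by omega, (PySem.Set.mem_ofList _ _).mpr hm, by norm_num⟩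
      simp [hneg, hnm]
  | succ n ih =>
    intro next smear h
    have hc : 0 ≤ next ∧ next ∈ PySem.Set.ofList most_important ∧ (1 : Int) ≠ 0 := by
      by_contra hc
      rw [sm_run_zero hc] at h
      omega
    have hrec : sm_run (next + 1) (PySem.Set.ofList most_important) 1 = n := by
      rw [sm_run_succ hc] at h
      omega
    have hm : next ∈ most_important := (PySem.Set.mem_ofList _ _).mp hc.2.1
    rw [smA]
    simp only [if_neg (by omega : ¬ next < 0), dif_pos hm]
    rw [ih (next + 1) (smear ++ [next]) hrec]
    have hcons : PySem.List.pyRange next (next + ((n : Int) + 1) * 1) 1 =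
        next :: PySem.List.pyRange (next + 1) (next + ((n : Int) + 1) * 1) 1 :=
      PySem.List.pyRange_one_cons (by omega)
    have harith : next + 1 + (n : Int) * 1 = next + ((n : Int) + 1) * 1 := by ring
    rw [harith]
    push_cast
    rw [hcons]
    simp

theorem smA_l (most_important : List Int) :
    ∀ (n : Nat) (next : Int) (smear : List Int),
      sm_run next (PySem.Set.ofList most_important) (-1) = n →
      smA next most_important "l" smear =
        smear ++ PySem.List.pyRange next (next + (n : Int) * (-1)) (-1) := by
  intro n
  induction n with
  | zero =>
    intro next smear h
    have hc : ¬ (0 ≤ next ∧ next ∈ PySem.Set.ofList most_important ∧ (-1 : Int) ≠ 0) := by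
      intro hc
      rw [sm_run_succ hc] at h
      omega
    rw [smA]
    have hrange : PySem.List.pyRange next (next + (0 : Int) * (-1)) (-1) = [] :=
      PySem.List.pyRange_neg_one_eq_nil (by omega)
    by_cases hneg : next < 0
    · simp [hneg]
    · have hnm : ¬ next ∈ most_important := by
        intro hm
        exact hc ⟨by omega, (PySem.Set.mem_ofList _ _).mpr hm, by norm_num⟩
      simp [hneg, hnm]
  | succ n ih =>
    intro next smear h
    have hc : 0 ≤ next ∧ next ∈ PySem.Set.ofList most_important ∧ (-1 : Int) ≠ 0 := by
      by_contra hc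
      rw [sm_run_zero hc] at h
      omega
    have hrec : sm_run (next + -1) (PySem.Set.ofList most_important) (-1) = n := by
      rw [sm_run_succ hc] at h
      omega
    have hm : next ∈ most_important := (PySem.Set.mem_ofList _ _).mp hc.2.1
    rw [smA]
    simp only [if_neg (by omega : ¬ next < 0), dif_pos hm,
      if_neg (by decide : ¬ ("l" : String) = "r")]
    have hrec' : sm_run (next - 1) (PySem.Set.ofList most_important) (-1) = n := by
      rw [show next - 1 = next + -1 by ring]; exact hrec
    rw [ih (next - 1) (smear ++ [next]) hrec']
    have hcons : PySem.List.pyRange next (next + ((n : Int) + 1) * (-1)) (-1) =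
        next :: PySem.List.pyRange (next - 1) (next + ((n : Int) + 1) * (-1)) (-1) :=
      PySem.List.pyRange_neg_one_cons (by omega)
    have harith : next - 1 + (n : Int) * (-1) = next + ((n : Int) + 1) * (-1) := by ring
    rw [harith]
    push_cast
    rw [hcons]
    simp

-- ===== VERDICT (by name: the statement is the Claim_ definition above) =====
theorem sm_spec : Claim_equal_sm := by
  intro next mi dir smear _ hpre
  unfold Spec_sm
  by_cases hr : dir = "r"
  · subst hr
    unfold sm sm_alt
    exact smA_r mi (sm_run next (PySem.Set.ofList mi) 1) next (smear.getD []) rfl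
  · by_cases hl : dir = "l"
    · subst hl
      unfold sm sm_alt
      simp only [if_neg (by decide : ¬ ("l" : String) = "r")]
      exact smA_l mi (sm_run next (PySem.Set.ofList mi) (-1)) next (smear.getD []) rfl
    · unfold sm sm_alt
      simp only [if_neg hr, if_neg hl]
      rw [smA]
      by_cases hneg : next < 0
      · simp [hneg]
      · by_cases hm : next ∈ mi
        · exact absurd (⟨by omega, hm, hr, hl⟩ : _) hpre
        · have : ¬ next ∈ PySem.Set.ofList mi := fun h => hm ((PySem.Set.mem_ofList _ _).mp h)
          simp [hneg, hm, this]
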